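-- pv_equiv track=rewrite | github.com/AlfredoCode/knn-entity-detection | src/evaluation/metrics.py | get_plain_text_cnec
-- ===== SOURCE A (Python) =====
-- from typing import Dict, Set, Tuple, List, Sequence, Optional
--
-- CNEC_CLASSES: Set[str] = {
--     "A", "C", "P", "T",
--     "ah", "at", "az",
--     "g_", "gc", "gh", "gl", "gq", "gr", "gs", "gt", "gu",
--     "i_", "ia", "ic", "if", "io",
--     "me", "mi", "mn", "ms",
--     "n_", "na", "nb", "nc", "ni", "no", "ns",
--     "o_", "oa", "oe", "om", "op", "or",
--     "p_", "pc", "pd", "pf", "pm", "pp", "ps",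
--     "td", "tf", "th", "tm", "ty",
-- }
--
-- def get_plain_text_cnec(entity_str: str) -> str:
--     result: List[str] = []
--     i, stack_depth = 0, 0
--     entity_len = len(entity_str)
--     while i < entity_len:
--         entity_char = entity_str[i]
--         if entity_char == '<':
--             j = i + 1
--             while j < entity_len and entity_str[j] not in (" ", ">", "<"):
--                 j += 1
--             tag = entity_str[i+1:j]
--             if tag in CNEC_CLASSES or tag in ("cap", "lower", "upper", "segm", "s", "f", "?"):
--                 stack_depth += 1
--                 i = j
--                 if i < entity_len and entity_str[i] == " ":
--                     i += 1
--                 continue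
--         if entity_char == ">" and stack_depth > 0:
--             stack_depth -= 1
--             i += 1
--             continue
--         result.append(entity_char)
--         i += 1
--     return "".join(result)
-- ===== SOURCE B (Python) =====
-- # Single-pass state machine: characters after '<' are buffered until a delimiter,
-- # then the buffered tag is resolved once; no index arithmetic, no inner rescan.
--
-- CNEC_CLASSES = {
--     "A", "C", "P", "T",
--     "ah", "at", "az",
--     "g_", "gc", "gh", "gl", "gq", "gr", "gs", "gt", "gu",
--     "i_", "ia", "ic", "if", "io",
--     "me", "mi", "mn", "ms",
--     "n_", "na", "nb", "nc", "ni", "no", "ns",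
--     "o_", "oa", "oe", "om", "op", "or",
--     "p_", "pc", "pd", "pf", "pm", "pp", "ps",
--     "td", "tf", "th", "tm", "ty",
-- }
--
-- RECOGNIZED = CNEC_CLASSES | {"cap", "lower", "upper", "segm", "s", "f", "?"}
--
--
-- def get_plain_text_cnec(entity_str: str) -> str:
--     out = []
--     depth = 0
--     buf = None  # None = normal mode; list = collecting a candidate tag after '<'
--     for ch in entity_str:
--         if buf is not None:
--             if ch not in ' <>':
--                 buf.append(ch)
--                 continue
--             tag = ''.join(buf)
--             buf = None
--             if tag in RECOGNIZED:
--                 depth += 1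
--                 if ch == ' ':
--                     continue  # one space after a recognized tag is consumed
--             else:
--                 out.append('<')
--                 out.append(tag)
--             # fall through: ch is handled in normal mode
--         if ch == '<':
--             buf = []
--         elif ch == '>' and depth > 0:
--             depth -= 1
--         else:
--             out.append(ch)
--     if buf is not None:
--         tag = ''.join(buf)
--         if tag not in RECOGNIZED:
--             out.append('<')
--             out.append(tag)
--     return ''.join(out)
-- ===== Notes on version B (the rewrite author's own statement) =====
-- stated objective: faster
-- what changed: A's index-based while loop with an inner lookahead rescan (j-scan plus slice, re-walking rejected tag runs) is replaced by a single left-to-right state-machine pass that buffers candidate tag characters after an opening angle bracket and resolves the buffered tag once at the next delimiter or at end of string.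
import Mathlib
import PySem

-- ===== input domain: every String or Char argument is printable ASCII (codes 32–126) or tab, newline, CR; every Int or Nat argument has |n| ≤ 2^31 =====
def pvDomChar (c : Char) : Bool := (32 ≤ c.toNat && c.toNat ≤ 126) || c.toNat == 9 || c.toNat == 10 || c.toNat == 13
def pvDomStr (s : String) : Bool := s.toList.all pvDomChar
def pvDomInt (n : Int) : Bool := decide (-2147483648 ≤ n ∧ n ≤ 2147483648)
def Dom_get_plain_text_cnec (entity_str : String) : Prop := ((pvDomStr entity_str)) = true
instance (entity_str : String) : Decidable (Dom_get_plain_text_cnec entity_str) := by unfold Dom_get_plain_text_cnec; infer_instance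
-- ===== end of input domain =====

-- B replaces A's index loop with inner lookahead rescan by a single left-to-right
-- state-machine pass that buffers a candidate tag after '<' (objective: alternative).

-- ===== PORT A =====

-- the recognized tags: CNEC_CLASSES plus ("cap","lower","upper","segm","s","f","?")
def cnecRecognized (t : String) : Bool :=
  ["A", "C", "P", "T", "ah", "at", "az",
   "g_", "gc", "gh", "gl", "gq", "gr", "gs", "gt", "gu",
   "i_", "ia", "ic", "if", "io",
   "me", "mi", "mn", "ms",
   "n_", "na", "nb", "nc", "ni", "no", "ns",
   "o_", "oa", "oe", "om", "op", "or",
   "p_", "pc", "pd", "pf", "pm", "pp", "ps",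
   "td", "tf", "th", "tm", "ty",
   "cap", "lower", "upper", "segm", "s", "f", "?"].contains t

-- entity_str[j] in (" ", ">", "<")
def cnecDelim (c : Char) : Bool := c == ' ' || c == '>' || c == '<'

-- inner while: j += 1 while j < len and entity_str[j] not a delimiter
def scanA (cs : List Char) (j : Nat) : Nat :=
  if h : j < cs.length then
    if cnecDelim (cs.getD j ' ') then j else scanA cs (j + 1)
  else j
termination_by cs.length - j
decreasing_by omega

theorem scanA_ge (cs : List Char) (j : Nat) : j ≤ scanA cs j := by
  unfold scanA
  split
  · split
    · exact le_refl j
    · have := scanA_ge cs (j + 1); omega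
  · exact le_refl j
termination_by cs.length - j
decreasing_by omega

-- outer while loop of A
def loopA (cs : List Char) (i depth : Nat) (acc : List Char) : List Char :=
  if hi : i < cs.length then
    let c := cs.getD i ' '
    if c = '<' then
      let j := scanA cs (i + 1)
      let tag := (cs.drop (i + 1)).take (j - (i + 1))
      if cnecRecognized (String.mk tag) then
        if j < cs.length ∧ cs.getD j ' ' = ' ' then
          loopA cs (j + 1) (depth + 1) acc
        else
          loopA cs j (depth + 1) acc
      else
        loopA cs (i + 1) depth (acc ++ ['<'])
    else if c = '>' ∧ 0 < depth then
      loopA cs (i + 1) (depth - 1) acc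
    else
      loopA cs (i + 1) depth (acc ++ [c])
  else acc
termination_by cs.length - i
decreasing_by
  all_goals first
    | omega
    | (have := scanA_ge cs (i + 1); omega)

def get_plain_text_cnec (entity_str : String) : String :=
  String.mk (loopA entity_str.toList 0 0 [])

-- ===== PORT B =====

-- normal-mode handling of one character (B's trailing if/elif/else chain)
def normalStepB (out : List Char) (depth : Nat) (ch : Char) :
    List Char × Nat × Option (List Char) :=
  if ch = '<' then (out, depth, some [])
  else if ch = '>' ∧ 0 < depth then (out, depth - 1, none)
  else (out ++ [ch], depth, none)

-- one step of B's for-loop over the characters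
def stepB (st : List Char × Nat × Option (List Char)) (ch : Char) :
    List Char × Nat × Option (List Char) :=
  match st with
  | (out, depth, some b) =>
    if ¬ cnecDelim ch then (out, depth, some (b ++ [ch]))
    else if cnecRecognized (String.mk b) then
      if ch = ' ' then (out, depth + 1, none)
      else normalStepB out (depth + 1) ch
    else normalStepB (out ++ '<' :: b) depth ch
  | (out, depth, none) => normalStepB out depth ch

-- B's trailing "if buf is not None" flush
def finB (st : List Char × Nat × Option (List Char)) : List Char :=
  match st with
  | (out, _, none) => out
  | (out, _, some b) => if cnecRecognized (String.mk b) then out else out ++ '<' :: b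

def get_plain_text_cnec_alt (entity_str : String) : String :=
  String.mk (finB (entity_str.toList.foldl stepB ([], 0, none)))

-- ===== PRECONDITION & SPEC =====
def Spec_get_plain_text_cnec (entity_str : String) (out : String) : Prop := out = get_plain_text_cnec_alt entity_str
instance (entity_str : String) (out : String) : Decidable (Spec_get_plain_text_cnec entity_str out) := by unfold Spec_get_plain_text_cnec; infer_instance

-- ===== CLAIM (what is proved, stated in full; the proofs are below) =====
def Claim_equal_get_plain_text_cnec : Prop := ∀ (entity_str : String), Dom_get_plain_text_cnec entity_str → Spec_get_plain_text_cnec entity_str (get_plain_text_cnec entity_str)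

-- ===== LEMMAS AND PROOFS =====

-- one-step unfolding of scanA
theorem scanA_eq (cs : List Char) (j : Nat) :
    scanA cs j = if j < cs.length then
      (if cnecDelim (cs.getD j ' ') then j else scanA cs (j + 1)) else j := by
  rw [scanA]
  split <;> simp_all

theorem scanA_le (cs : List Char) (j : Nat) (hj : j ≤ cs.length) : scanA cs j ≤ cs.length := by
  by_cases hl : j < cs.length
  · by_cases hd : cnecDelim (cs.getD j ' ') = true
    · rw [scanA_eq, if_pos hl, if_pos hd]; omega
    · rw [scanA_eq, if_pos hl, if_neg hd]
      exact scanA_le cs (j + 1) (by omega)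
  · rw [scanA_eq, if_neg hl]; omega
termination_by cs.length - j
decreasing_by omega

-- the character scanA stops at (when inside the string) is a delimiter
theorem scanA_stop (cs : List Char) (j : Nat) (h : scanA cs j < cs.length) :
    cnecDelim (cs.getD (scanA cs j) ' ') = true := by
  by_cases hl : j < cs.length
  · by_cases hd : cnecDelim (cs.getD j ' ') = true
    · have he : scanA cs j = j := by rw [scanA_eq, if_pos hl, if_pos hd]
      rw [he]; exact hd
    · have he : scanA cs j = scanA cs (j + 1) := by rw [scanA_eq, if_pos hl, if_neg hd]
      rw [he] at h ⊢
      exact scanA_stop cs (j + 1) h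
  · have he : scanA cs j = j := by rw [scanA_eq, if_neg hl]
    rw [he] at h; omega
termination_by cs.length - j
decreasing_by omega

-- A's tag slice is the takeWhile of the suffix
theorem scanA_take (cs : List Char) (j : Nat) (hj : j ≤ cs.length) :
    (cs.drop j).takeWhile (fun c => !cnecDelim c) = (cs.drop j).take (scanA cs j - j) := by
  by_cases hl : j < cs.length
  · have hgd : cs.getD j ' ' = cs[j] := List.getD_eq_getElem cs ' ' hl
    by_cases hd : cnecDelim (cs.getD j ' ') = true
    · have he : scanA cs j = j := by rw [scanA_eq, if_pos hl, if_pos hd]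
      rw [hgd] at hd
      rw [he, Nat.sub_self, List.take_zero]
      conv_lhs => rw [List.drop_eq_getElem_cons hl]
      rw [List.takeWhile_cons, if_neg (by simp [hd])]
    · have he : scanA cs j = scanA cs (j + 1) := by rw [scanA_eq, if_pos hl, if_neg hd]
      rw [hgd] at hd
      have hdb : cnecDelim cs[j] = false := by simpa using hd
      have hge := scanA_ge cs (j + 1)
      have harith : scanA cs (j + 1) - j = (scanA cs (j + 1) - (j + 1)) + 1 := by omega
      have ih := scanA_take cs (j + 1) (by omega)
      rw [he, harith]
      conv_lhs => rw [List.drop_eq_getElem_cons hl]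
      conv_rhs => rw [List.drop_eq_getElem_cons hl]
      rw [List.takeWhile_cons, if_pos (by simp [hdb]), List.take_succ_cons, ih]
  · have h1 : cs.drop j = [] := List.drop_eq_nil_of_le (by omega)
    simp [h1]
termination_by cs.length - j
decreasing_by omega

-- the suffix after the tag is the dropWhile of the suffix
theorem scanA_drop (cs : List Char) (j : Nat) (hj : j ≤ cs.length) :
    (cs.drop j).dropWhile (fun c => !cnecDelim c) = cs.drop (scanA cs j) := by
  by_cases hl : j < cs.length
  · have hgd : cs.getD j ' ' = cs[j] := List.getD_eq_getElem cs ' ' hl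
    by_cases hd : cnecDelim (cs.getD j ' ') = true
    · have he : scanA cs j = j := by rw [scanA_eq, if_pos hl, if_pos hd]
      rw [hgd] at hd
      rw [he]
      conv_lhs => rw [List.drop_eq_getElem_cons hl]
      rw [List.dropWhile_cons, if_neg (by simp [hd])]
      exact (List.drop_eq_getElem_cons hl).symm
    · have he : scanA cs j = scanA cs (j + 1) := by rw [scanA_eq, if_pos hl, if_neg hd]
      rw [hgd] at hd
      have hdb : cnecDelim cs[j] = false := by simpa using hd
      have ih := scanA_drop cs (j + 1) (by omega)
      rw [he]
      conv_lhs => rw [List.drop_eq_getElem_cons hl]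
      rw [List.dropWhile_cons, if_pos (by simp [hdb]), ih]
  · have h1 : cs.drop j = [] := List.drop_eq_nil_of_le (by omega)
    have h2 : cs.drop (scanA cs j) = [] :=
      List.drop_eq_nil_of_le (by have := scanA_ge cs j; omega)
    simp [h1, h2]
termination_by cs.length - j
decreasing_by omega

-- folding B in buffer mode over a nondelimiter prefix followed by a delimiter
theorem foldB_buf_split (p : List Char) (ch : Char) (r out : List Char) (depth : Nat)
    (b : List Char) (hp : ∀ c ∈ p, cnecDelim c = false) (hch : cnecDelim ch = true) :
    List.foldl stepB (out, depth, some b) (p ++ ch :: r) =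
      List.foldl stepB
        (if cnecRecognized (String.mk (b ++ p)) then
          (if ch = ' ' then (out, depth + 1, none) else normalStepB out (depth + 1) ch)
        else normalStepB (out ++ '<' :: (b ++ p)) depth ch) r := by
  induction p generalizing b with
  | nil => simp [stepB, hch]
  | cons c p ih =>
    have hc : cnecDelim c = false := hp c (by simp)
    simp only [List.cons_append, List.foldl_cons, stepB]
    rw [if_pos (by simp [hc])]
    have := ih (b ++ [c]) (fun x hx => hp x (by simp [hx]))
    simpa using this

-- folding B in buffer mode over an all-nondelimiter list
theorem foldB_buf_all (p out : List Char) (depth : Nat) (b : List Char)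
    (hp : ∀ c ∈ p, cnecDelim c = false) :
    List.foldl stepB (out, depth, some b) p = (out, depth, some (b ++ p)) := by
  induction p generalizing b with
  | nil => simp
  | cons c p ih =>
    have hc : cnecDelim c = false := hp c (by simp)
    simp only [List.foldl_cons, stepB]
    rw [if_pos (by simp [hc])]
    have := ih (b ++ [c]) (fun x hx => hp x (by simp [hx]))
    simpa using this

-- folding B in normal mode over an all-nondelimiter prefix just appends it
theorem foldB_none_all (p r out : List Char) (depth : Nat)
    (hp : ∀ c ∈ p, cnecDelim c = false) :
    List.foldl stepB (out, depth, none) (p ++ r) =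
      List.foldl stepB (out ++ p, depth, none) r := by
  induction p generalizing out with
  | nil => simp
  | cons c p ih =>
    have hc : cnecDelim c = false := hp c (by simp)
    have h1 : ¬ c = '<' := by intro h; subst h; simp [cnecDelim] at hc
    have h2 : ¬ c = '>' := by intro h; subst h; simp [cnecDelim] at hc
    simp only [List.cons_append, List.foldl_cons, stepB, normalStepB]
    rw [if_neg h1, if_neg (by simp [h2])]
    have := ih (out ++ [c]) (fun x hx => hp x (by simp [hx]))
    simpa using this

-- main invariant: A's index loop from i equals B's fold over the suffix
theorem loopA_eq_fold (cs : List Char) (i depth : Nat) (acc : List Char)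
    (hi : i ≤ cs.length) :
    loopA cs i depth acc = finB (List.foldl stepB (acc, depth, none) (cs.drop i)) := by
  by_cases h : i < cs.length
  · have hgd : cs.getD i ' ' = cs[i] := List.getD_eq_getElem cs ' ' h
    have hdropi : cs.drop i = cs[i] :: cs.drop (i + 1) := List.drop_eq_getElem_cons h
    unfold loopA
    simp only [h, dif_pos]
    rw [hgd]
    by_cases hc : cs[i] = '<'
    · -- tag-scanning branch
      rw [if_pos hc]
      have hj1 : i + 1 ≤ scanA cs (i + 1) := scanA_ge cs (i + 1)
      have hj2 : scanA cs (i + 1) ≤ cs.length := scanA_le cs (i + 1) (by omega)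
      set j := scanA cs (i + 1) with hjdef
      have htake : (cs.drop (i + 1)).takeWhile (fun c => !cnecDelim c)
          = (cs.drop (i + 1)).take (j - (i + 1)) := scanA_take cs (i + 1) (by omega)
      have hdropw : (cs.drop (i + 1)).dropWhile (fun c => !cnecDelim c)
          = cs.drop j := scanA_drop cs (i + 1) (by omega)
      have hsplit : cs.drop (i + 1) = (cs.drop (i + 1)).take (j - (i + 1)) ++ cs.drop j := by
        conv_lhs => rw [← List.takeWhile_append_dropWhile
          (p := fun c => !cnecDelim c) (l := cs.drop (i + 1))]
        rw [htake, hdropw]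
      have htagmem : ∀ c ∈ (cs.drop (i + 1)).take (j - (i + 1)), cnecDelim c = false := by
        intro c hcmem
        rw [← htake] at hcmem
        have := List.mem_takeWhile_imp hcmem
        simpa using this
      conv_rhs => rw [hdropi, List.foldl_cons]
      have hstep1 : stepB (acc, depth, none) cs[i] = (acc, depth, some []) := by
        simp [stepB, normalStepB, hc]
      rw [hstep1]
      by_cases hjlen : j < cs.length
      · -- a delimiter stops the tag scan
        have hgdj : cs.getD j ' ' = cs[j] := List.getD_eq_getElem cs ' ' hjlen
        have hdropj : cs.drop j = cs[j] :: cs.drop (j + 1) := List.drop_eq_getElem_cons hjlen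
        have hdelim : cnecDelim cs[j] = true := by
          have := scanA_stop cs (i + 1) (by omega)
          rwa [← hjdef, hgdj] at this
        conv_rhs => rw [hsplit, hdropj]
        rw [foldB_buf_split ((cs.drop (i + 1)).take (j - (i + 1))) cs[j] _ _ _ _ htagmem hdelim]
        simp only [List.nil_append]
        by_cases hrec : cnecRecognized (String.mk ((cs.drop (i + 1)).take (j - (i + 1)))) = true
        · rw [if_pos hrec, if_pos hrec]
          by_cases hsp : cs[j] = ' '
          · rw [if_pos ⟨hjlen, by rw [hgdj]; exact hsp⟩, if_pos hsp]
            exact loopA_eq_fold cs (j + 1) (depth + 1) acc (by omega)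
          · rw [if_neg (by rw [hgdj]; tauto), if_neg hsp]
            rw [loopA_eq_fold cs j (depth + 1) acc (by omega)]
            conv_lhs => rw [hdropj, List.foldl_cons]
            congr 2 <;> simp [stepB, normalStepB]
        · rw [if_neg hrec, if_neg hrec]
          rw [loopA_eq_fold cs (i + 1) depth (acc ++ ['<']) (by omega)]
          conv_lhs => rw [hsplit, hdropj]
          rw [foldB_none_all ((cs.drop (i + 1)).take (j - (i + 1)))
            (cs[j] :: cs.drop (j + 1)) (acc ++ ['<']) depth htagmem, List.foldl_cons]
          congr 2
          simp [stepB, normalStepB]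
      · -- the tag runs to the end of the string
        have hjeq : j = cs.length := by omega
        have hdropj : cs.drop j = [] := by simp [hjeq]
        conv_rhs => rw [hsplit, hdropj, List.append_nil]
        rw [foldB_buf_all ((cs.drop (i + 1)).take (j - (i + 1))) acc depth [] htagmem]
        simp only [List.nil_append]
        by_cases hrec : cnecRecognized (String.mk ((cs.drop (i + 1)).take (j - (i + 1)))) = true
        · rw [if_pos hrec, if_neg (fun hx => absurd hx.1 (by omega))]
          rw [loopA_eq_fold cs j (depth + 1) acc (by omega), hdropj]
          simp [finB, hrec]
        · rw [if_neg hrec]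
          rw [loopA_eq_fold cs (i + 1) depth (acc ++ ['<']) (by omega)]
          have hfold := foldB_none_all ((cs.drop (i + 1)).take (j - (i + 1))) []
            (acc ++ ['<']) depth htagmem
          rw [List.append_nil] at hfold
          conv_lhs => rw [hsplit, hdropj, List.append_nil]
          rw [hfold]
          simp [finB, hrec]
    · -- plain character
      rw [if_neg hc]
      conv_rhs => rw [hdropi, List.foldl_cons]
      by_cases hgt : cs[i] = '>' ∧ 0 < depth
      · rw [if_pos hgt]
        rw [loopA_eq_fold cs (i + 1) (depth - 1) acc (by omega)]
        congr 2
        simp only [stepB, normalStepB]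
        rw [if_neg hc, if_pos hgt]
      · rw [if_neg hgt]
        rw [loopA_eq_fold cs (i + 1) depth (acc ++ [cs[i]]) (by omega)]
        congr 2
        simp only [stepB, normalStepB]
        rw [if_neg hc, if_neg hgt]
  · have h1 : i = cs.length := by omega
    unfold loopA
    simp [h, h1, finB]
termination_by cs.length - i
decreasing_by all_goals omega

-- ===== VERDICT (by name: the statement is the Claim_ definition above) =====
theorem get_plain_text_cnec_spec : Claim_equal_get_plain_text_cnec := by
  intro s _
  unfold Spec_get_plain_text_cnec get_plain_text_cnec get_plain_text_cnec_alt
  rw [loopA_eq_fold s.toList 0 0 [] (by omega)]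
  simp
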